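-- pv_equiv track=rewrite | github.com/lijackson/BGRunner | python_race_solver.py | get_all_next_boards
-- ===== SOURCE A (Python) =====
-- def get_all_next_boards(initial_board, roll):
--     boards = [initial_board]
--     if roll[0] == roll[1]:
--         roll = (roll[0], roll[0], roll[0], roll[0])
--     for d in roll:
--         new_boards = []
--         for board in boards:
--             overshoot_index = max((i for i, x in enumerate(board) if x > 0), default=-1)
--             no_moves = True
--             for i in range(len(board)):
--                 if board[i] == 0:
--                     continue
--                 if i-d < 0 and i != overshoot_index:
--                     continue
--                 no_moves = False
--                 new_boards.append(move_new_board(board, (i,d)))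
--             if no_moves:
--                 new_boards.append(board)
--         boards = new_boards
--     return set(boards)
--
-- def move_new_board(board, move):
--     return tuple(board[i] - (move[0]==i) + (move[0]-move[1]==i) for i in range(len(board)))
-- ===== SOURCE B (Python) =====
-- def get_all_next_boards(initial_board, roll):
--     # Memoized depth-first recursion over the dice: for each (board, dice consumed)
--     # the ordered set of final boards reachable from it is computed once and cached,
--     # so duplicate intermediate boards are expanded only once (A re-expands every
--     # duplicate path level by level and deduplicates only at the very end).
--     dice = (roll[0],) * 4 if roll[0] == roll[1] else tuple(roll)
--     n = len(dice)
--     cache = {}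
--
--     def leaves(board, k):
--         if k == n:
--             return (board,)
--         hit = cache.get((board, k))
--         if hit is not None:
--             return hit
--         d = dice[k]
--         overshoot = -1
--         for i, x in enumerate(board):
--             if x > 0:
--                 overshoot = i
--         succs = [bear(board, i, d) for i in range(len(board))
--                  if board[i] != 0 and (d <= i or i == overshoot)]
--         if not succs:
--             succs = [board]
--         out, seen = [], set()
--         for s in succs:
--             for leaf in leaves(s, k + 1):
--                 if leaf not in seen:
--                     seen.add(leaf)
--                     out.append(leaf)
--         res = tuple(out)
--         cache[(board, k)] = res
--         return res
--
--     return set(leaves(tuple(initial_board), 0))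
--
-- def bear(board, i, d):
--     new = list(board)
--     new[i] -= 1
--     if 0 <= i - d < len(new):
--         new[i - d] += 1
--     return tuple(new)
-- ===== Notes on version B (the rewrite author's own statement) =====
-- stated objective: faster
-- what changed: B replaces A's iterative level-by-level expansion of a duplicate-carrying board list (deduplicated only at the very end) by a memoized depth-first recursion over the dice that computes the ordered set of final boards once per distinct (board, dice-consumed) state and merges deduplicated subtree results.
import Mathlib
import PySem

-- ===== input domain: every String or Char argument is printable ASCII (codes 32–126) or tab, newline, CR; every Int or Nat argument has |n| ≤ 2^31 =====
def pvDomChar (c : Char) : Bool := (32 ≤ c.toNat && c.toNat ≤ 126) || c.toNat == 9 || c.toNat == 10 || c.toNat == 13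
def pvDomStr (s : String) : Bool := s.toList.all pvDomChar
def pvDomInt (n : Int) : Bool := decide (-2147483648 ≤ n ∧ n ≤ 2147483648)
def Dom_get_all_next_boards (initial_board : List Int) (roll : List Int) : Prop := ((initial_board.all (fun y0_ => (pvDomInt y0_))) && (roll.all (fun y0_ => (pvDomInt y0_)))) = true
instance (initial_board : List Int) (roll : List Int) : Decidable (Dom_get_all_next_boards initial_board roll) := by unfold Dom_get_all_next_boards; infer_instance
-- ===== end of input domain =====

-- B replaces A's level-by-level expansion of a duplicate-carrying board list (deduped only at the end)
-- by a memoized depth-first recursion over the dice (cached per distinct (board, dice-consumed) state): faster.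


-- ===== PORT A =====
-- move_new_board(board, move): tuple comprehension over range(len(board)); board[i] is in range, so getD is exact
def pvMoveNewBoard (board : List Int) (move : Int × Int) : List Int :=
  (List.range board.length).map (fun i =>
    board.getD i 0 - (if move.1 = (i : Int) then 1 else 0) + (if move.1 - move.2 = (i : Int) then 1 else 0))

-- overshoot_index = max((i for i, x in enumerate(board) if x > 0), default=-1)
def pvOvershootA (board : List Int) : Int :=
  (PySem.List.max? (((PySem.List.enumerate board 0).filter (fun p => 0 < p.2)).map (fun p => p.1))
    (fun x => x)).getD (-1)

-- roll[0]/roll[1] raise IndexError when len(roll) < 2: excluded by Pre_; pyGetD is exact inside Pre_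
def get_all_next_boards (initial_board : List Int) (roll : List Int) : List (List Int) :=
  let r0 := PySem.List.pyGetD roll 0 0
  let roll2 := if r0 = PySem.List.pyGetD roll 1 0 then [r0, r0, r0, r0] else roll
  let boards := roll2.foldl (fun boards d =>
    boards.foldl (fun new_boards board =>
      let overshoot_index := pvOvershootA board
      let res := (List.range board.length).foldl (fun (acc : List (List Int) × Bool) i =>
        if board.getD i 0 = 0 then acc
        else if (i : Int) - d < 0 ∧ (i : Int) ≠ overshoot_index then acc
        else (acc.1 ++ [pvMoveNewBoard board ((i : Int), d)], false)) (new_boards, true)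
      if res.2 then res.1 ++ [board] else res.1) []) [initial_board]
  PySem.Set.ofList boards

-- ===== PORT B =====
-- bear(board, i, d): copy, decrement the source pip, increment the target pip if it is on the board
def pvApplyMove (board : List Int) (i : Nat) (d : Int) : List Int :=
  let nw := board.set i (board.getD i 0 - 1)
  if 0 ≤ (i : Int) - d ∧ (i : Int) - d < (nw.length : Int) then  -- 0 <= i-d < len(new)
    nw.set ((i : Int) - d).toNat (nw.getD ((i : Int) - d).toNat 0 + 1)  -- index nonneg and < len: exact
  else nw

-- running last-positive-index scan
def pvOvershootB (board : List Int) : Int :=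
  (PySem.List.enumerate board 0).foldl (fun acc p => if 0 < p.2 then p.1 else acc) (-1)

-- succs = [bear(board, i, d) for i in range(len(board)) if board[i] != 0 and (d <= i or i == overshoot)]
def pvSuccsB (board : List Int) (d : Int) : List (List Int) :=
  (List.range board.length).filterMap (fun i =>
    if board.getD i 0 ≠ 0 ∧ (d ≤ (i : Int) ∨ (i : Int) = pvOvershootB board)
    then some (pvApplyMove board i d) else none)

-- if not succs: succs = [board]
def pvExpandB (board : List Int) (d : Int) : List (List Int) :=
  if (pvSuccsB board d).isEmpty then [board] else pvSuccsB board d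

-- cache: Python keys (board, k) with k dice consumed; since the dice list is fixed, k is stored
-- equivalently as the number of REMAINING dice (the recursion argument here)
abbrev PvCache := PySem.Dict (List Int × Nat) (List (List Int))

mutual
-- def leaves(board, k): memoized; recursion on the remaining dice
def pvLeaves (b : List Int) (ds : List Int) (c : PvCache) : List (List Int) × PvCache :=
  match ds with
  | [] => ([b], c)
  | d :: ds' =>
    match PySem.Dict.get? c (b, ds'.length + 1) with
    | some v => (v, c)
    | none =>
      let r := pvLeavesFold (pvExpandB b d) ds' PySem.Set.empty c
      (r.1, PySem.Dict.insert r.2 (b, ds'.length + 1) r.1)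
  termination_by (2 * ds.length, 0)
  decreasing_by apply Prod.Lex.left; simp only [List.length_cons]; omega

-- the out/seen loop: for s in succs: for leaf in leaves(s, k+1): append if unseen  (= ordered-set update)
def pvLeavesFold (bs : List (List Int)) (ds : List Int) (acc : PySem.Set (List Int)) (c : PvCache) :
    List (List Int) × PvCache :=
  match bs with
  | [] => (acc, c)
  | s :: bs' =>
    let r := pvLeaves s ds c
    pvLeavesFold bs' ds (PySem.Set.update acc r.1) r.2
  termination_by (2 * ds.length + 1, bs.length)
  decreasing_by
    · apply Prod.Lex.left; omega
    · apply Prod.Lex.right; simp only [List.length_cons]; omega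
end

def get_all_next_boards_alt (initial_board : List Int) (roll : List Int) : List (List Int) :=
  let r0 := PySem.List.pyGetD roll 0 0
  let dice := if r0 = PySem.List.pyGetD roll 1 0 then List.replicate 4 r0 else roll
  PySem.Set.ofList (pvLeaves initial_board dice PySem.Dict.empty).1  -- return set(leaves(...))

-- ===== PRECONDITION & SPEC =====
-- Python A evaluates roll[0] and roll[1]: IndexError (for both A and B) when len(roll) < 2
def Pre_get_all_next_boards (_initial_board : List Int) (roll : List Int) : Prop := 2 ≤ roll.length
instance (initial_board : List Int) (roll : List Int) : Decidable (Pre_get_all_next_boards initial_board roll) := by unfold Pre_get_all_next_boards; infer_instance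
def pvWitness_get_all_next_boards : List Int × List Int := ([1, 0, 2], [1, 2])

def Spec_get_all_next_boards (initial_board : List Int) (roll : List Int) (out : List (List Int)) : Prop := out = get_all_next_boards_alt initial_board roll
instance (initial_board : List Int) (roll : List Int) (out : List (List Int)) : Decidable (Spec_get_all_next_boards initial_board roll out) := by unfold Spec_get_all_next_boards; infer_instance

-- ===== CLAIM (what is proved, stated in full; the proofs are below) =====
def Claim_equal_get_all_next_boards : Prop := ∀ (initial_board : List Int) (roll : List Int), Dom_get_all_next_boards initial_board roll → Pre_get_all_next_boards initial_board roll → Spec_get_all_next_boards initial_board roll (get_all_next_boards initial_board roll)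

-- ===== LEMMAS AND PROOFS =====

-- last-element fold over the filtered index list
theorem pvFoldLastFilter (l : List (Int × Int)) : ∀ (acc : Int),
    l.foldl (fun acc p => if 0 < p.2 then p.1 else acc) acc
    = ((l.filter (fun p => 0 < p.2)).map (fun p => p.1)).foldl (fun _ x => x) acc := by
  induction l with
  | nil => intro acc; rfl
  | cons p l ih =>
    intro acc
    by_cases h : 0 < p.2 <;> simp [h, ih]

theorem pvFoldMaxLast (t : List Int) : ∀ (x : Int), (x :: t).Pairwise (· < ·) →
    t.foldl max x = t.foldl (fun _ y => y) x := by
  induction t with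
  | nil => intro x _; rfl
  | cons y t ih =>
    intro x hp
    have hxy : x < y := (List.pairwise_cons.mp hp).1 y List.mem_cons_self
    have hyt : (y :: t).Pairwise (· < ·) := (List.pairwise_cons.mp hp).2
    simp only [List.foldl_cons, max_eq_right (le_of_lt hxy)]
    exact ih y hyt

theorem pvMaxLast (P : List Int) (hpw : P.Pairwise (· < ·)) :
    (PySem.List.max? P (fun x => x)).getD (-1) = P.foldl (fun _ x => x) (-1) := by
  cases P with
  | nil => rfl
  | cons p t =>
    rw [PySem.List.max?_id_cons]
    simp only [Option.getD_some, List.foldl_cons]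
    exact pvFoldMaxLast t p hpw

theorem pvOvershoot_eq (board : List Int) : pvOvershootA board = pvOvershootB board := by
  unfold pvOvershootA pvOvershootB
  rw [pvFoldLastFilter, pvMaxLast]
  refine List.Pairwise.map _ (fun a b h => h) ?_
  exact List.Pairwise.filter _ (PySem.List.pairwise_lt_enumerate board 0)

theorem pvMove_eq (board : List Int) (i : Nat) (d : Int) (h : i < board.length) :
    pvMoveNewBoard board ((i : Int), d) = pvApplyMove board i d := by
  unfold pvMoveNewBoard pvApplyMove
  apply List.ext_getElem
  · simp only [List.length_map, List.length_range]
    split <;> simp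
  · intro j hj1 hj2
    simp only [List.getElem_map, List.getElem_range]
    have hj : j < board.length := by simpa using hj1
    have hbj : board.getD j 0 = board[j] := List.getD_eq_getElem board 0 hj
    have hbi : board.getD i 0 = board[i] := List.getD_eq_getElem board 0 h
    have hij : ((i : Int) = (j : Int)) ↔ i = j := by omega
    by_cases hc : 0 ≤ (i : Int) - d ∧ (i : Int) - d < ((board.set i (board.getD i 0 - 1)).length : Int)
    · have hklen : ((i : Int) - d).toNat < board.length := by
        simp only [List.length_set] at hc; omega
      have hkj : ((i : Int) - d = (j : Int)) ↔ (((i : Int) - d).toNat = j) := by omega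
      have hgk : (board.set i (board.getD i 0 - 1)).getD ((i : Int) - d).toNat 0
          = if i = ((i : Int) - d).toNat then board.getD i 0 - 1
            else board[((i : Int) - d).toNat]'hklen := by
        rw [List.getD_eq_getElem _ 0 (by simpa using hklen), List.getElem_set]
      simp only [if_pos hc, List.getElem_set, hgk, hij, hkj]
      have hbk : board.getD ((i : Int) - d).toNat 0 = board[((i : Int) - d).toNat]'hklen :=
        List.getD_eq_getElem _ 0 hklen
      simp only [hbi, hbj]
      split_ifs with h1 h2 h3 h4 h5 h6 <;> subst_vars <;> omega
    · have h2 : ¬ ((i : Int) - d = (j : Int)) := by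
        simp only [List.length_set, not_and, not_lt] at hc; omega
      simp only [if_neg hc, List.getElem_set, hij, h2, if_false]
      by_cases h1 : i = j <;> simp_all

theorem pvInnerFold (board : List Int) (d : Int) (g : Nat → Option (List Int))
    (hg : ∀ i, g i = if board.getD i 0 ≠ 0 ∧ (d ≤ (i : Int) ∨ (i : Int) = pvOvershootB board)
      then some (pvApplyMove board i d) else none) :
    ∀ (ix : List Nat) (nb : List (List Int)) (flag : Bool),
      (∀ i ∈ ix, i < board.length) →
      ix.foldl (fun (acc : List (List Int) × Bool) i =>
        if board.getD i 0 = 0 then acc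
        else if (i : Int) - d < 0 ∧ (i : Int) ≠ pvOvershootA board then acc
        else (acc.1 ++ [pvMoveNewBoard board ((i : Int), d)], false)) (nb, flag)
      = (nb ++ ix.filterMap g, flag && (ix.filterMap g).isEmpty) := by
  intro ix
  induction ix with
  | nil => intro nb flag _; simp
  | cons i ix ih =>
    intro nb flag hlt
    have hi : i < board.length := hlt i List.mem_cons_self
    have hrest : ∀ j ∈ ix, j < board.length := fun j hj => hlt j (List.mem_cons_of_mem _ hj)
    by_cases h1 : board.getD i 0 = 0
    · have hgi : g i = none := by rw [hg, if_neg]; exact fun hc => hc.1 h1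
      simp only [List.foldl_cons, if_pos h1, List.filterMap_cons, hgi]
      exact ih nb flag hrest
    · by_cases h2 : (i : Int) - d < 0 ∧ (i : Int) ≠ pvOvershootA board
      · have hgi : g i = none := by
          rw [hg, if_neg]
          rw [pvOvershoot_eq] at h2
          intro hcond
          rcases hcond with ⟨_, hor⟩
          rcases hor with hle | heq
          · omega
          · exact h2.2 heq
        simp only [List.foldl_cons, if_neg h1, if_pos h2, List.filterMap_cons, hgi]
        exact ih nb flag hrest
      · have hgi : g i = some (pvApplyMove board i d) := by
          rw [hg, if_pos]
          rw [pvOvershoot_eq] at h2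
          constructor
          · exact h1
          · by_cases hle : d ≤ (i : Int)
            · exact Or.inl hle
            · right
              by_contra hne
              exact h2 ⟨by omega, hne⟩
        simp only [List.foldl_cons, if_neg h1, if_neg h2, List.filterMap_cons, hgi]
        rw [ih (nb ++ [pvMoveNewBoard board ((i : Int), d)]) false hrest]
        rw [pvMove_eq board i d hi]
        simp

-- one A-level equals extending by pvExpandB
theorem pvStepA (d : Int) (L : List (List Int)) :
    L.foldl (fun new_boards board =>
      let overshoot_index := pvOvershootA board
      let res := (List.range board.length).foldl (fun (acc : List (List Int) × Bool) i =>
        if board.getD i 0 = 0 then acc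
        else if (i : Int) - d < 0 ∧ (i : Int) ≠ overshoot_index then acc
        else (acc.1 ++ [pvMoveNewBoard board ((i : Int), d)], false)) (new_boards, true)
      if res.2 then res.1 ++ [board] else res.1) []
    = L.flatMap (fun b => pvExpandB b d) := by
  have hbody : ∀ (nb : List (List Int)) (board : List Int),
      (let overshoot_index := pvOvershootA board
       let res := (List.range board.length).foldl (fun (acc : List (List Int) × Bool) i =>
        if board.getD i 0 = 0 then acc
        else if (i : Int) - d < 0 ∧ (i : Int) ≠ overshoot_index then acc
        else (acc.1 ++ [pvMoveNewBoard board ((i : Int), d)], false)) (nb, true)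
       if res.2 then res.1 ++ [board] else res.1) = nb ++ pvExpandB board d := by
    intro nb board
    show (let res := (List.range board.length).foldl (fun (acc : List (List Int) × Bool) i =>
        if board.getD i 0 = 0 then acc
        else if (i : Int) - d < 0 ∧ (i : Int) ≠ pvOvershootA board then acc
        else (acc.1 ++ [pvMoveNewBoard board ((i : Int), d)], false)) (nb, true)
      if res.2 then res.1 ++ [board] else res.1) = nb ++ pvExpandB board d
    rw [pvInnerFold board d _ (fun i => rfl) (List.range board.length) nb true
      (fun i hi => List.mem_range.mp hi)]
    show (if (true && (pvSuccsB board d).isEmpty) = true then (nb ++ pvSuccsB board d) ++ [board]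
          else nb ++ pvSuccsB board d) = nb ++ pvExpandB board d
    unfold pvExpandB
    by_cases h : (pvSuccsB board d).isEmpty
    · rw [List.isEmpty_iff] at h
      simp [h]
    · simp [h]
  calc L.foldl (fun new_boards board =>
      let overshoot_index := pvOvershootA board
      let res := (List.range board.length).foldl (fun (acc : List (List Int) × Bool) i =>
        if board.getD i 0 = 0 then acc
        else if (i : Int) - d < 0 ∧ (i : Int) ≠ overshoot_index then acc
        else (acc.1 ++ [pvMoveNewBoard board ((i : Int), d)], false)) (new_boards, true)
      if res.2 then res.1 ++ [board] else res.1) []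
      = L.foldl (fun nb b => nb ++ pvExpandB b d) [] := by
        apply PySem.List.foldl_congr_mem
        intro nb b _
        exact hbody nb b
    _ = L.flatMap (fun b => pvExpandB b d) := by
        rw [PySem.List.foldl_append_eq_flatMap]
        simp

-- pure (cache-free) leaves function: the specification of pvLeaves
mutual
def pvLP (b : List Int) (ds : List Int) : List (List Int) :=
  match ds with
  | [] => [b]
  | d :: ds' => PySem.Set.ofList (pvLPs (pvExpandB b d) ds')
  termination_by (2 * ds.length, 0)
  decreasing_by apply Prod.Lex.left; simp only [List.length_cons]; omega

def pvLPs (bs : List (List Int)) (ds : List Int) : List (List Int) :=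
  match bs with
  | [] => []
  | s :: bs' => pvLP s ds ++ pvLPs bs' ds
  termination_by (2 * ds.length + 1, bs.length)
  decreasing_by
    · apply Prod.Lex.left; omega
    · apply Prod.Lex.right; simp only [List.length_cons]; omega
end

theorem pvLPs_flatMap (bs : List (List Int)) (ds : List Int) :
    pvLPs bs ds = bs.flatMap (fun b => pvLP b ds) := by
  induction bs with
  | nil => rw [pvLPs]; rfl
  | cons s bs ih => rw [pvLPs, ih, List.flatMap_cons]

-- dedup of a segment does not change the surrounding ordered-set update
theorem pvUpdate_ofList (s : PySem.Set (List Int)) (xs : List (List Int)) :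
    PySem.Set.update s (PySem.Set.ofList xs) = PySem.Set.update s xs := by
  rw [PySem.Set.update_eq_append_filter, PySem.Set.update_eq_append_filter, PySem.Set.ofList_ofList]

theorem pvUpdate_empty (xs : List (List Int)) :
    PySem.Set.update (PySem.Set.empty : PySem.Set (List Int)) xs = PySem.Set.ofList xs := rfl

theorem pvSegmentDedup (f : List Int → List (List Int)) :
    ∀ (L : List (List Int)) (s : PySem.Set (List Int)),
    PySem.Set.update s (L.flatMap (fun x => PySem.Set.ofList (f x))) = PySem.Set.update s (L.flatMap f) := by
  intro L
  induction L with
  | nil => intro s; rfl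
  | cons x L ih =>
    intro s
    simp only [List.flatMap_cons]
    rw [PySem.Set.update_append, PySem.Set.update_append, pvUpdate_ofList, ih]

theorem pvFoldUpdate (f : List Int → List (List Int)) (L : List (List Int)) :
    ∀ (s : PySem.Set (List Int)),
    L.foldl (fun nxt b => PySem.Set.update nxt (f b)) s = PySem.Set.update s (L.flatMap f) := by
  induction L with
  | nil => intro s; rfl
  | cons x L ih =>
    intro s
    simp only [List.foldl_cons, List.flatMap_cons]
    rw [ih, PySem.Set.update_append]

-- BFS final list and pure DFS leaves agree as ordered sets
theorem pvBFS_eq_LP (D : List Int) : ∀ (L : List (List Int)),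
    PySem.Set.ofList (D.foldl (fun L d => L.flatMap (fun b => pvExpandB b d)) L)
    = PySem.Set.ofList (L.flatMap (fun b => pvLP b D)) := by
  induction D with
  | nil =>
    intro L
    simp [pvLP]
  | cons d D ih =>
    intro L
    simp only [List.foldl_cons]
    rw [ih, List.flatMap_assoc]
    have hLP : (fun b => pvLP b (d :: D))
        = fun b => PySem.Set.ofList ((pvExpandB b d).flatMap (fun s => pvLP s D)) := by
      funext b
      simp [pvLP, pvLPs_flatMap]
    rw [hLP]
    apply Eq.symm
    rw [← pvUpdate_empty, ← pvUpdate_empty, pvSegmentDedup]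

-- cache invariant: every entry is the pure leaves value of the corresponding suffix
def pvGood (D : List Int) (c : PvCache) : Prop :=
  ∀ b n v, PySem.Dict.get? c (b, n) = some v →
    n ≤ D.length ∧ v = pvLP b (D.drop (D.length - n))

theorem pvSuffix_drop {ds D : List Int} (h : ds <:+ D) :
    D.drop (D.length - ds.length) = ds := by
  obtain ⟨t, rfl⟩ := h
  have : (t ++ ds).length - ds.length = t.length := by simp
  rw [this, List.drop_left]

theorem pvGood_empty (D : List Int) : pvGood D PySem.Dict.empty := by
  intro b n v h
  simp [PySem.Dict.get?_empty] at h

theorem pvLeaves_correct (D : List Int) : ∀ (ds : List Int), ds <:+ D →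
    ∀ (b : List Int) (c : PvCache), pvGood D c →
      (pvLeaves b ds c).1 = pvLP b ds ∧ pvGood D (pvLeaves b ds c).2 := by
  intro ds
  induction ds with
  | nil =>
    intro _ b c hc
    constructor
    · simp [pvLeaves, pvLP]
    · simpa [pvLeaves] using hc
  | cons d ds ih =>
    intro hsuf b c hc
    have hsuf' : ds <:+ D := (List.suffix_cons d ds).trans hsuf
    have hfold : ∀ (bs : List (List Int)) (acc : PySem.Set (List Int)) (c : PvCache), pvGood D c →
        (pvLeavesFold bs ds acc c).1
          = bs.foldl (fun a s => PySem.Set.update a (pvLP s ds)) acc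
        ∧ pvGood D (pvLeavesFold bs ds acc c).2 := by
      intro bs
      induction bs with
      | nil =>
        intro acc c hc
        rw [pvLeavesFold]
        exact ⟨rfl, hc⟩
      | cons s bs ihb =>
        intro acc c hc
        obtain ⟨h1, h2⟩ := ih hsuf' s c hc
        obtain ⟨h3, h4⟩ := ihb (PySem.Set.update acc (pvLeaves s ds c).1) (pvLeaves s ds c).2 h2
        constructor
        · rw [pvLeavesFold]
          rw [h3, h1, List.foldl_cons]
        · rw [pvLeavesFold]
          exact h4
    have hlen : ds.length + 1 ≤ D.length := by
      have := hsuf.length_le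
      simpa using this
    have hdrop : D.drop (D.length - (ds.length + 1)) = d :: ds := by
      have := pvSuffix_drop hsuf
      simpa using this
    cases hget : PySem.Dict.get? c (b, ds.length + 1) with
    | some v =>
      obtain ⟨_, hv⟩ := hc b (ds.length + 1) v hget
      constructor
      · simp only [pvLeaves, hget]
        rw [hv, hdrop]
      · simpa only [pvLeaves, hget] using hc
    | none =>
      obtain ⟨hf1, hf2⟩ := hfold (pvExpandB b d) PySem.Set.empty c hc
      have hr1 : (pvLeavesFold (pvExpandB b d) ds PySem.Set.empty c).1 = pvLP b (d :: ds) := by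
        rw [hf1, pvFoldUpdate, pvUpdate_empty, ← pvLPs_flatMap]
        rw [show pvLP b (d :: ds) = PySem.Set.ofList (pvLPs (pvExpandB b d) ds) from by simp [pvLP]]
      constructor
      · simp only [pvLeaves, hget]
        exact hr1
      · simp only [pvLeaves, hget]
        intro b' n' v' hget'
        rw [PySem.Dict.get?_insert] at hget'
        by_cases hk : (b', n') = (b, ds.length + 1)
        · rw [if_pos hk] at hget'
          simp only [Prod.mk.injEq] at hk
          obtain ⟨hb', hn'⟩ := hk
          injection hget' with hv'
          subst hb'; subst hn'
          refine ⟨hlen, ?_⟩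
          rw [hdrop, ← hv', hr1]
        · rw [if_neg hk] at hget'
          exact hf2 b' n' v' hget'

-- the whole pipeline for an arbitrary dice list
theorem pvMainEq (D : List Int) (ib : List Int) :
    PySem.Set.ofList (D.foldl (fun boards d =>
      boards.foldl (fun new_boards board =>
        let overshoot_index := pvOvershootA board
        let res := (List.range board.length).foldl (fun (acc : List (List Int) × Bool) i =>
          if board.getD i 0 = 0 then acc
          else if (i : Int) - d < 0 ∧ (i : Int) ≠ overshoot_index then acc
          else (acc.1 ++ [pvMoveNewBoard board ((i : Int), d)], false)) (new_boards, true)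
        if res.2 then res.1 ++ [board] else res.1) []) [ib])
    = PySem.Set.ofList (pvLeaves ib D PySem.Dict.empty).1 := by
  have hA : (D.foldl (fun boards d =>
      boards.foldl (fun new_boards board =>
        let overshoot_index := pvOvershootA board
        let res := (List.range board.length).foldl (fun (acc : List (List Int) × Bool) i =>
          if board.getD i 0 = 0 then acc
          else if (i : Int) - d < 0 ∧ (i : Int) ≠ overshoot_index then acc
          else (acc.1 ++ [pvMoveNewBoard board ((i : Int), d)], false)) (new_boards, true)
        if res.2 then res.1 ++ [board] else res.1) []) [ib])
      = D.foldl (fun L d => L.flatMap (fun b => pvExpandB b d)) [ib] := by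
    congr 1
    funext L d
    exact pvStepA d L
  rw [hA, pvBFS_eq_LP]
  rw [(pvLeaves_correct D D (List.suffix_refl D) ib PySem.Dict.empty (pvGood_empty D)).1]
  simp

-- ===== VERDICT (by name: the statement is the Claim_ definition above) =====
theorem get_all_next_boards_spec : Claim_equal_get_all_next_boards := by
  intro initial_board roll _ _
  unfold Spec_get_all_next_boards
  simp only [get_all_next_boards, get_all_next_boards_alt]
  rw [show (List.replicate 4 (PySem.List.pyGetD roll 0 0))
      = [PySem.List.pyGetD roll 0 0, PySem.List.pyGetD roll 0 0, PySem.List.pyGetD roll 0 0,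
         PySem.List.pyGetD roll 0 0] from rfl]
  exact pvMainEq _ initial_board
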